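-- pv_equiv track=rewrite | github.com/Matias-Garcia/Matias-Garcia | Projects/DP_jumping.py | Fred
-- ===== SOURCE A (Python) =====
-- def Fred(r, g, b):
--     def dp(i, last_color, cache):
--         # Base case: If Fred reaches or passes the end of the lilypad row
--         if i >= len(r):
--             return 0
--
--         # Check if the result is already cached
--         if cache[i][last_color] is not None:
--             return cache[i][last_color]
--
--         # Recursive case: Maximize the score by choosing a different color
--         total_score = 0
--         for color in range(3):  # Iterate through colors: 0 = red, 1 = green, 2 = blue
--             if color != last_color:  # Fred cannot land on the same color twice in a row
--                 jump_score = 0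
--                 if color == 0:  # Red
--                     jump_score = r[i] + dp(i + 1, color, cache)
--                 elif color == 1:  # Green
--                     jump_score = g[i] + dp(i + 1, color, cache)
--                 elif color == 2:  # Blue
--                     jump_score = b[i] + dp(i + 1, color, cache)
--
--                 total_score = max(total_score, jump_score)
--
--         # Cache the result to avoid redundant computations
--         cache[i][last_color] = total_score
--         return total_score
--
--     # Initialize the cache: 2D array with dimensions [len(r)][3]
--     cache = [[None] * 3 for _ in range(len(r))]
--
--     # Start the recursion with no last color (-1)
--     return dp(0, -1, cache)
-- ===== SOURCE B (Python) =====
-- def Fred(r, g, b):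
--     # bottom-up iterative DP over last-color states instead of memoized recursion
--     d0 = d1 = d2 = 0
--     for i in range(len(r) - 1, 0, -1):
--         x0 = r[i] + d0
--         x1 = g[i] + d1
--         x2 = b[i] + d2
--         d0, d1, d2 = max(0, x1, x2), max(0, x0, x2), max(0, x0, x1)
--     if not r:
--         return 0
--     return max(0, r[0] + d0, g[0] + d1, b[0] + d2)
-- ===== Notes on version B (the rewrite author's own statement) =====
-- stated objective: simpler
-- what changed: Replaced the memoized top-down recursion with an O(n)-size cache by a bottom-up iterative DP that keeps only the three per-last-color values, scanning the lists once from the end.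
import Mathlib
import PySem

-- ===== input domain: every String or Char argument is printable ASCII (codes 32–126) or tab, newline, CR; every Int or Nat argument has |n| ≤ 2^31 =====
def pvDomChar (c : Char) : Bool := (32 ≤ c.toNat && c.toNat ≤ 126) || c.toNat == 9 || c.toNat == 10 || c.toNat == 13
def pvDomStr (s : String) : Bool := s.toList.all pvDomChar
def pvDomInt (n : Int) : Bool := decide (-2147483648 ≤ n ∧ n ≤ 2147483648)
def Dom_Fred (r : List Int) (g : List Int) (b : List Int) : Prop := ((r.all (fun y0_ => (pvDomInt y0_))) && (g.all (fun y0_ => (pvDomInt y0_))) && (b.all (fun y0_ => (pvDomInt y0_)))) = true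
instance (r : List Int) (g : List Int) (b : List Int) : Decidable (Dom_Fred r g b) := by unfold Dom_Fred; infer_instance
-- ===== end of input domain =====

-- B replaces A's memoized recursion by a bottom-up three-state iterative DP (simpler, no cache).

-- ===== PORT A =====
-- cache[i][last]  (last may be -1: Python negative indexing into the length-3 row)
def cacheGet (c : List (List (Option Int))) (i : Nat) (last : Int) : Option Int :=
  PySem.List.pyGetD (PySem.List.pyGetD c (i : Int) []) last none

def cacheSet (c : List (List (Option Int))) (i : Nat) (last : Int) (v : Int) :
    List (List (Option Int)) :=
  PySem.List.pySetD c (i : Int) (PySem.List.pySetD (PySem.List.pyGetD c (i : Int) []) last (some v))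

-- r[i] under Pre_ (index always in range there)
def pyAt (xs : List Int) (i : Nat) : Int := PySem.List.pyGetD xs (i : Int) 0

-- literal transliteration of A's inner dp: the loop 'for color in range(3)' is written out as
-- its three iterations, each threading the mutable cache exactly as the Python recursion does
def dpA (r g b : List Int) (i : Nat) (last : Int) (cache : List (List (Option Int))) :
    Int × List (List (Option Int)) :=
  if h : r.length ≤ i then (0, cache)
  else
    match cacheGet cache i last with
    | some v => (v, cache)
    | none =>
      let t0 : Int := 0
      let p1 := if (0 : Int) ≠ last then
          let s := dpA r g b (i + 1) 0 cache
          (max t0 (pyAt r i + s.1), s.2)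
        else (t0, cache)
      let p2 := if (1 : Int) ≠ last then
          let s := dpA r g b (i + 1) 1 p1.2
          (max p1.1 (pyAt g i + s.1), s.2)
        else p1
      let p3 := if (2 : Int) ≠ last then
          let s := dpA r g b (i + 1) 2 p2.2
          (max p2.1 (pyAt b i + s.1), s.2)
        else p2
      (p3.1, cacheSet p3.2 i last p3.1)
termination_by r.length - i
decreasing_by all_goals omega

def Fred (r : List Int) (g : List Int) (b : List Int) : Int :=
  (dpA r g b 0 (-1) (List.replicate r.length (List.replicate 3 none))).1

-- ===== PORT B =====
def altStep (r g b : List Int) (s : Int × Int × Int) (i : Int) : Int × Int × Int :=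
  let x0 := PySem.List.pyGetD r i 0 + s.1
  let x1 := PySem.List.pyGetD g i 0 + s.2.1
  let x2 := PySem.List.pyGetD b i 0 + s.2.2
  (max (max 0 x1) x2, max (max 0 x0) x2, max (max 0 x0) x1)

def Fred_alt (r : List Int) (g : List Int) (b : List Int) : Int :=
  let s := (PySem.List.pyRange ((r.length : Int) - 1) 0 (-1)).foldl (altStep r g b) (0, 0, 0)
  if r = [] then 0
  else
    max (max (max 0 (PySem.List.pyGetD r 0 0 + s.1)) (PySem.List.pyGetD g 0 0 + s.2.1))
      (PySem.List.pyGetD b 0 0 + s.2.2)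

-- ===== PRECONDITION & SPEC =====
-- Pre_ excludes exactly the inputs where A raises IndexError: when g or b is shorter than r,
-- both Pythons index past the end of g or b (B raises there too).
def Pre_Fred (r : List Int) (g : List Int) (b : List Int) : Prop :=
  r.length ≤ g.length ∧ r.length ≤ b.length
instance (r : List Int) (g : List Int) (b : List Int) : Decidable (Pre_Fred r g b) := by
  unfold Pre_Fred; infer_instance

def pvWitness_Fred : List Int × List Int × List Int := ([1, -2, 3], [2, 2, -1], [-5, 4, 0])

def Spec_Fred (r : List Int) (g : List Int) (b : List Int) (out : Int) : Prop :=
  out = Fred_alt r g b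
instance (r : List Int) (g : List Int) (b : List Int) (out : Int) :
    Decidable (Spec_Fred r g b out) := by unfold Spec_Fred; infer_instance

-- ===== CLAIM (what is proved, stated in full; the proofs are below) =====
def Claim_equal_Fred : Prop := ∀ (r : List Int) (g : List Int) (b : List Int),
  Dom_Fred r g b → Pre_Fred r g b → Spec_Fred r g b (Fred r g b)

-- ===== LEMMAS AND PROOFS =====

-- the pure value both programs compute: dp(i,last) without any cache
def pureDp (r g b : List Int) (i : Nat) (last : Int) : Int :=
  if h : r.length ≤ i then 0
  else
    let t0 : Int := 0
    let t1 := if (0 : Int) ≠ last then max t0 (pyAt r i + pureDp r g b (i + 1) 0) else t0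
    let t2 := if (1 : Int) ≠ last then max t1 (pyAt g i + pureDp r g b (i + 1) 1) else t1
    if (2 : Int) ≠ last then max t2 (pyAt b i + pureDp r g b (i + 1) 2) else t2
termination_by r.length - i
decreasing_by all_goals omega

def slotC (cs : List (List (Option Int))) (i j : Nat) : Option Int := (cs.getD i []).getD j none

def ValidC (r g b : List Int) (cs : List (List (Option Int))) : Prop :=
  cs.length = r.length ∧
  (∀ row ∈ cs, row.length = 3) ∧
  (∀ j, slotC cs 0 j = none) ∧
  (∀ i j, 1 ≤ i → j < 3 → slotC cs i j = none ∨ slotC cs i j = some (pureDp r g b i (j : Int)))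

lemma pureDp_base (r g b : List Int) (i : Nat) (last : Int) (h : r.length ≤ i) :
    pureDp r g b i last = 0 := by rw [pureDp]; simp [h]

lemma cacheGet_eq_slot (r : List Int) (cs : List (List (Option Int))) (i : Nat) (last : Int)
    (hlen : cs.length = r.length) (hi : i < r.length) (hrow : ∀ row ∈ cs, row.length = 3)
    (hl : last = 0 ∨ last = 1 ∨ last = 2) :
    cacheGet cs i last = slotC cs i last.toNat := by
  have hic : i < cs.length := by omega
  have hmem : cs.getD i [] ∈ cs := by
    have : cs.getD i [] = cs[i] := List.getD_eq_getElem cs [] hic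
    rw [this]; exact List.getElem_mem hic
  have h3 : (cs.getD i []).length = 3 := hrow _ hmem
  have h3' : (cs[i]?.getD []).length = 3 := by simpa [List.getD] using h3
  have hc : PySem.List.pyGetD cs (i : Int) [] = cs.getD i [] := by
    simp [PySem.List.pyGetD_natCast]
  simp only [cacheGet]
  rw [hc]
  rcases hl with h | h | h <;> subst h <;>
    simp [slotC, List.getD, PySem.List.pyGetD, PySem.List.pyGet?, PySem.List.pyIdx?, h3, h3']

lemma cacheSet_eq_set (r : List Int) (cs : List (List (Option Int))) (i : Nat) (last : Int)
    (v : Int) (hl : 0 ≤ last) :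
    cacheSet cs i last v = cs.set i ((cs.getD i []).set last.toNat (some v)) := by
  simp [cacheSet, PySem.List.pySetD_of_nonneg _ _ hl, PySem.List.pySetD_natCast,
    PySem.List.pyGetD_natCast]

lemma getD_mem_of_lt (cs : List (List (Option Int))) (i : Nat) (hic : i < cs.length) :
    cs.getD i [] ∈ cs := by
  rw [List.getD_eq_getElem (l := cs) (d := []) hic]
  exact List.getElem_mem hic

lemma getD_set_ne (row : List (Option Int)) (k j : Nat) (v : Option Int) (hk : k ≠ j) :
    (row.set k v).getD j none = row.getD j none := by
  rw [List.getD_eq_getElem?_getD, List.getD_eq_getElem?_getD, List.getElem?_set_ne hk]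

lemma getD_set_self (row : List (Option Int)) (k : Nat) (v : Option Int) (hk : k < row.length) :
    (row.set k v).getD k none = v := by
  rw [List.getD_eq_getElem?_getD, List.getElem?_set_self hk]
  rfl

lemma slot_set (cs : List (List (Option Int))) (i : Nat) (row : List (Option Int)) (i' j : Nat)
    (hi : i < cs.length) :
    slotC (cs.set i row) i' j = if i' = i then row.getD j none else slotC cs i' j := by
  have houter : ∀ (l : List (List (Option Int))) (n : Nat), l.getD n [] = l[n]?.getD [] :=
    fun l n => List.getD_eq_getElem?_getD
  simp only [slotC, houter]
  by_cases h : i' = i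
  · subst h
    rw [List.getElem?_set_self (by simpa using hi)]
    simp [if_pos rfl]
  · rw [List.getElem?_set_ne (Ne.symm h)]
    simp [h]

lemma valid_cacheSet (r g b : List Int) (cs : List (List (Option Int))) (i : Nat) (last : Int)
    (hv : ValidC r g b cs) (hi1 : 1 ≤ i) (hi : i < r.length)
    (hl : last = 0 ∨ last = 1 ∨ last = 2) :
    ValidC r g b (cacheSet cs i last (pureDp r g b i last)) := by
  obtain ⟨hlen, hrow, h0, hval⟩ := hv
  have hl0 : 0 ≤ last := by rcases hl with h | h | h <;> simp [h]
  have hlt3 : last.toNat < 3 := by rcases hl with h | h | h <;> subst h <;> omega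
  have hcast : ((last.toNat : Nat) : Int) = last := by
    rcases hl with h | h | h <;> subst h <;> rfl
  rw [cacheSet_eq_set r cs i last _ hl0]
  have hic : i < cs.length := by omega
  have hmemi : cs.getD i [] ∈ cs := getD_mem_of_lt cs i hic
  have h3 : (cs.getD i []).length = 3 := hrow _ hmemi
  refine ⟨by simpa using hlen, ?_, ?_, ?_⟩
  · intro row hmem
    rcases List.mem_or_eq_of_mem_set hmem with h | h
    · exact hrow _ h
    · subst h
      simpa using h3
  · intro j
    rw [slot_set _ _ _ _ _ hic]
    have hne : (0 : Nat) ≠ i := by omega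
    simp [hne, h0]
  · intro i' j hi' hj
    rw [slot_set _ _ _ _ _ hic]
    by_cases h : i' = i
    · subst h
      by_cases hji : j = last.toNat
      · subst hji
        right
        rw [if_pos rfl, getD_set_self _ _ _ (by omega), hcast]
      · rw [if_pos rfl, getD_set_ne _ _ _ _ (Ne.symm hji)]
        exact hval _ j hi' hj
    · rw [if_neg h]
      exact hval _ _ hi' hj

set_option maxRecDepth 4000 in
lemma dpA_correct (r g b : List Int) : ∀ (k i : Nat) (last : Int)
    (cs : List (List (Option Int))), r.length - i ≤ k → 1 ≤ i →
    (last = 0 ∨ last = 1 ∨ last = 2) → ValidC r g b cs →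
    (dpA r g b i last cs).1 = pureDp r g b i last ∧ ValidC r g b (dpA r g b i last cs).2 := by
  intro k
  induction k with
  | zero =>
    intro i last cs hk hi1 hl hv
    have hbase : r.length ≤ i := by omega
    rw [dpA, pureDp]
    simp [hbase, hv]
  | succ k ih =>
    intro i last cs hk hi1 hl hv
    by_cases hbase : r.length ≤ i
    · rw [dpA, pureDp]; simp [hbase, hv]
    · have hi : i < r.length := by omega
      rw [dpA]
      simp only [dif_neg hbase]
      obtain ⟨hlen, hrow, h0, hval⟩ := hv
      rw [cacheGet_eq_slot r cs i last hlen hi hrow hl]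
      rcases hval i last.toNat hi1 (by rcases hl with h | h | h <;> subst h <;> omega) with
        hnone | hsome
      · rw [hnone]
        simp only []
        -- evaluate the three color branches
        rcases hl with h | h | h <;> subst h
        · -- last = 0 : branch 0 skipped
          have r1 := ih (i+1) 1 cs (by omega) (by omega) (by tauto) ⟨hlen, hrow, h0, hval⟩
          have r2 := ih (i+1) 2 (dpA r g b (i+1) 1 cs).2 (by omega) (by omega) (by tauto) r1.2
          rw [pureDp]
          simp only [dif_neg hbase]
          simp only [ne_eq, not_true_eq_false, if_false, if_pos (by decide : (1:Int) ≠ 0),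
            if_pos (by decide : (2:Int) ≠ 0)]
          have hpure : pureDp r g b i 0
              = max (max 0 (pyAt g i + pureDp r g b (i+1) 1))
                (pyAt b i + pureDp r g b (i+1) 2) := by
            rw [pureDp]
            simp only [dif_neg hbase, ne_eq, not_true_eq_false, if_false,
              if_pos (by decide : (1:Int) ≠ 0), if_pos (by decide : (2:Int) ≠ 0)]
          constructor
          · rw [r1.1, r2.1, ← hpure]
          · rw [r1.1, r2.1, ← hpure]
            exact valid_cacheSet r g b _ i 0 r2.2 hi1 hi (by tauto)
        · -- last = 1
          have r1 := ih (i+1) 0 cs (by omega) (by omega) (by tauto) ⟨hlen, hrow, h0, hval⟩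
          have r2 := ih (i+1) 2 (dpA r g b (i+1) 0 cs).2 (by omega) (by omega) (by tauto) r1.2
          rw [pureDp]
          simp only [dif_neg hbase]
          simp only [ne_eq, not_true_eq_false, if_false, if_pos (by decide : (0:Int) ≠ 1),
            if_pos (by decide : (2:Int) ≠ 1)]
          have hpure : pureDp r g b i 1
              = max (max 0 (pyAt r i + pureDp r g b (i+1) 0))
                (pyAt b i + pureDp r g b (i+1) 2) := by
            rw [pureDp]
            simp only [dif_neg hbase, ne_eq, not_true_eq_false, if_false,
              if_pos (by decide : (0:Int) ≠ 1), if_pos (by decide : (2:Int) ≠ 1)]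
          constructor
          · rw [r1.1, r2.1, ← hpure]
          · rw [r1.1, r2.1, ← hpure]
            exact valid_cacheSet r g b _ i 1 r2.2 hi1 hi (by tauto)
        · -- last = 2
          have r1 := ih (i+1) 0 cs (by omega) (by omega) (by tauto) ⟨hlen, hrow, h0, hval⟩
          have r2 := ih (i+1) 1 (dpA r g b (i+1) 0 cs).2 (by omega) (by omega) (by tauto) r1.2
          rw [pureDp]
          simp only [dif_neg hbase]
          simp only [ne_eq, not_true_eq_false, if_false, if_pos (by decide : (0:Int) ≠ 2),
            if_pos (by decide : (1:Int) ≠ 2)]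
          have hpure : pureDp r g b i 2
              = max (max 0 (pyAt r i + pureDp r g b (i+1) 0))
                (pyAt g i + pureDp r g b (i+1) 1) := by
            rw [pureDp]
            simp only [dif_neg hbase, ne_eq, not_true_eq_false, if_false,
              if_pos (by decide : (0:Int) ≠ 2), if_pos (by decide : (1:Int) ≠ 2)]
          constructor
          · rw [r1.1, r2.1, ← hpure]
          · rw [r1.1, r2.1, ← hpure]
            exact valid_cacheSet r g b _ i 2 r2.2 hi1 hi (by tauto)
      · rw [hsome]
        have hcast : ((last.toNat : Nat) : Int) = last := by
          rcases hl with h | h | h <;> subst h <;> rfl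
        rw [hcast]
        exact ⟨rfl, hlen, hrow, h0, hval⟩

lemma hrow3_getD (j : Nat) : (List.replicate 3 (none : Option Int)).getD j none = none := by
  by_cases hj : j < 3
  · interval_cases j <;> rfl
  · exact List.getD_eq_default _ _ (by simp; omega)

lemma slot_init (n i j : Nat) :
    slotC (List.replicate n (List.replicate 3 none)) i j = none := by
  unfold slotC
  by_cases hi : i < n
  · rw [List.getD_eq_getElem (l := List.replicate n (List.replicate 3 none)) (d := [])
      (by simpa using hi)]
    simp only [List.getElem_replicate]
    exact hrow3_getD j
  · rw [List.getD_eq_default (l := List.replicate n (List.replicate 3 none)) (d := [])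
      (by simp; omega)]
    rfl

lemma valid_init (r g b : List Int) :
    ValidC r g b (List.replicate r.length (List.replicate 3 none)) := by
  refine ⟨by simp, ?_, fun j => slot_init _ _ _, fun i j _ _ => Or.inl (slot_init _ _ _)⟩
  intro row hmem
  rw [List.eq_of_mem_replicate hmem]
  simp

lemma cacheGet_init (n : Nat) (hn : 0 < n) :
    cacheGet (List.replicate n (List.replicate 3 none)) 0 (-1) = none := by
  unfold cacheGet
  have h1 : PySem.List.pyGetD (List.replicate n (List.replicate 3 (none : Option Int)))
      ((0 : Nat) : Int) [] = List.replicate 3 none := by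
    rw [PySem.List.pyGetD_natCast]
    rw [List.getD_eq_getElem (l := List.replicate n (List.replicate 3 none)) (d := [])
      (by simpa using hn)]
    simp
  rw [h1]
  decide

lemma fred_val (r g b : List Int) (hr : r ≠ []) :
    Fred r g b = max (max (max 0 (pyAt r 0 + pureDp r g b (0+1) 0))
      (pyAt g 0 + pureDp r g b (0+1) 1)) (pyAt b 0 + pureDp r g b (0+1) 2) := by
  have hn : 0 < r.length := List.length_pos_of_ne_nil hr
  have hb : ¬ r.length ≤ 0 := by omega
  have hv := valid_init r g b
  have r1 := dpA_correct r g b r.length (0+1) 0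
    (List.replicate r.length (List.replicate 3 none)) (by omega) (by omega) (by tauto) hv
  have r2 := dpA_correct r g b r.length (0+1) 1
    (dpA r g b (0+1) 0 (List.replicate r.length (List.replicate 3 none))).2
    (by omega) (by omega) (by tauto) r1.2
  have r3 := dpA_correct r g b r.length (0+1) 2
    (dpA r g b (0+1) 1
      (dpA r g b (0+1) 0 (List.replicate r.length (List.replicate 3 none))).2).2
    (by omega) (by omega) (by tauto) r2.2
  unfold Fred
  rw [dpA]
  simp only [dif_neg hb]
  rw [cacheGet_init r.length hn]
  simp only [ne_eq, if_pos (by decide : (0:Int) ≠ -1), if_pos (by decide : (1:Int) ≠ -1),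
    if_pos (by decide : (2:Int) ≠ -1)]
  rw [r1.1, r2.1, r3.1]

lemma altStep_pure (r g b : List Int) (m : Nat) (hm : 1 ≤ m) (hlt : m < r.length) :
    altStep r g b
      (pureDp r g b (m+1) 0, pureDp r g b (m+1) 1, pureDp r g b (m+1) 2) ((m : Nat) : Int)
    = (pureDp r g b m 0, pureDp r g b m 1, pureDp r g b m 2) := by
  have hb : ¬ r.length ≤ m := by omega
  have e0 : pureDp r g b m 0
      = max (max 0 (pyAt g m + pureDp r g b (m+1) 1)) (pyAt b m + pureDp r g b (m+1) 2) := by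
    rw [pureDp]
    simp only [dif_neg hb, ne_eq, not_true_eq_false, if_false,
      if_pos (by decide : (1:Int) ≠ 0), if_pos (by decide : (2:Int) ≠ 0)]
  have e1 : pureDp r g b m 1
      = max (max 0 (pyAt r m + pureDp r g b (m+1) 0)) (pyAt b m + pureDp r g b (m+1) 2) := by
    rw [pureDp]
    simp only [dif_neg hb, ne_eq, not_true_eq_false, if_false,
      if_pos (by decide : (0:Int) ≠ 1), if_pos (by decide : (2:Int) ≠ 1)]
  have e2 : pureDp r g b m 2
      = max (max 0 (pyAt r m + pureDp r g b (m+1) 0)) (pyAt g m + pureDp r g b (m+1) 1) := by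
    rw [pureDp]
    simp only [dif_neg hb, ne_eq, not_true_eq_false, if_false,
      if_pos (by decide : (0:Int) ≠ 2), if_pos (by decide : (1:Int) ≠ 2)]
  simp only [altStep, pyAt] at e0 e1 e2 ⊢
  rw [e0, e1, e2]

lemma fold_pure (r g b : List Int) : ∀ (j : Nat), j ≤ r.length - 1 →
    (PySem.List.pyRange ((j : Nat) : Int) 0 (-1)).foldl (altStep r g b)
      (pureDp r g b (j+1) 0, pureDp r g b (j+1) 1, pureDp r g b (j+1) 2)
    = (pureDp r g b (0+1) 0, pureDp r g b (0+1) 1, pureDp r g b (0+1) 2) := by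
  intro j
  induction j with
  | zero =>
    intro _
    rw [PySem.List.pyRange_neg_one_eq_nil (by norm_num)]
    rfl
  | succ n ihn =>
    intro hj
    rw [PySem.List.pyRange_neg_one_cons (by positivity : (0:Int) < ((n+1 : Nat) : Int))]
    have hc : ((n+1 : Nat) : Int) - 1 = ((n : Nat) : Int) := by push_cast; ring
    rw [hc, List.foldl_cons, altStep_pure r g b (n+1) (by omega) (by omega)]
    exact ihn (by omega)

lemma fredalt_val (r g b : List Int) (hr : r ≠ []) :
    Fred_alt r g b = max (max (max 0 (pyAt r 0 + pureDp r g b (0+1) 0))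
      (pyAt g 0 + pureDp r g b (0+1) 1)) (pyAt b 0 + pureDp r g b (0+1) 2) := by
  have hn : 0 < r.length := List.length_pos_of_ne_nil hr
  have hcast : ((r.length : Int) - 1) = ((r.length - 1 : Nat) : Int) := by omega
  have hfold := fold_pure r g b (r.length - 1) (le_refl _)
  have hlen1 : r.length - 1 + 1 = r.length := by omega
  rw [hlen1] at hfold
  rw [pureDp_base r g b r.length 0 (le_refl _), pureDp_base r g b r.length 1 (le_refl _),
    pureDp_base r g b r.length 2 (le_refl _)] at hfold
  simp only [Fred_alt, if_neg hr]
  rw [hcast, hfold]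
  simp [pyAt]

theorem Fred_spec : Claim_equal_Fred := by
  intro r g b _ _
  unfold Spec_Fred
  by_cases hr : r = []
  · subst hr
    have ha : Fred [] g b = 0 := by unfold Fred; rw [dpA]; simp
    have hb : Fred_alt [] g b = 0 := by simp [Fred_alt]
    rw [ha, hb]
  · rw [fred_val r g b hr, fredalt_val r g b hr]
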